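-- pv_equiv track=rewrite | github.com/githubhuyang/refactory | basic_framework/hole_injection.py | get_task_score
-- ===== SOURCE A (Python) =====
-- def get_task_score(task):
--     score_dict = {"ifbrk": 22,
--                   "ifctn": 22,
--                   "ifret": 22,
--                   "ret": 20,
--                   "ini": 20,
--                   "assign": 20,
--                   "cond": 2,
--                   "ifcond": 2,
--                   "indent": 2,
--                   "rm": 4,
--                   "ctn": 1,
--                   "brk": 1,
--                   "method": 1}
--
--     dd = get_dist_dict(task)
--     score = 0
--     for name_type, cnt in dd.items():
--         score += score_dict[name_type] * cnt
--     return score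
--
-- def get_dist_dict(task):
--     dist_dict = {}
--     for name in task:
--         name_type = name.split("_")[0]
--         if name_type not in dist_dict.keys():
--             dist_dict[name_type] = 0
--         dist_dict[name_type] += 1
--
--     return dist_dict
-- ===== SOURCE B (Python) =====
-- def _weight(t):
--     if t in ("ifbrk", "ifctn", "ifret"):
--         return 22
--     if t in ("ret", "ini", "assign"):
--         return 20
--     if t in ("cond", "ifcond", "indent"):
--         return 2
--     if t == "rm":
--         return 4
--     if t in ("ctn", "brk", "method"):
--         return 1
--     raise KeyError(t)
--
--
-- def get_task_score(task):
--     return sum(_weight(name.split("_")[0]) for name in task)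
-- ===== Notes on version B (the rewrite author's own statement) =====
-- stated objective: simpler
-- what changed: B drops the intermediate count dictionary and the score table entirely: it sums a tiered if-chain weight of each name's '_'-prefix in a single comprehension over task.
import Mathlib
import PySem

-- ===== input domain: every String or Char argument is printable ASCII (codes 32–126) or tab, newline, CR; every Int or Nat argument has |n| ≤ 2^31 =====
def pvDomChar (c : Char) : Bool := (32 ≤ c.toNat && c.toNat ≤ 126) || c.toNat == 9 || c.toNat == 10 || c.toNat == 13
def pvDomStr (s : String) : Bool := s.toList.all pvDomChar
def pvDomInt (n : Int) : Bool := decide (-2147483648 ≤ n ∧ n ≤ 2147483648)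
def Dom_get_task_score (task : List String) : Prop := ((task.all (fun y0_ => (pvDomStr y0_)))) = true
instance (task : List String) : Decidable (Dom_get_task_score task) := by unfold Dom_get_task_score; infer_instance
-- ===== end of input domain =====

-- B replaces A's count dictionary + score table with a single summed pass using a tiered if-chain weight (objective: simpler).

-- ===== PORT A =====
-- score_dict literal of A
def scoreDictA : PySem.Dict String Int :=
  PySem.Dict.ofList [("ifbrk", 22), ("ifctn", 22), ("ifret", 22), ("ret", 20), ("ini", 20),
    ("assign", 20), ("cond", 2), ("ifcond", 2), ("indent", 2), ("rm", 4),
    ("ctn", 1), ("brk", 1), ("method", 1)]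

-- name.split("_")[0]; the separator is nonempty (split? = some) and the split list is never empty, so getD/headD are exact
def prefixA (name : String) : String := ((PySem.Str.split? name "_").getD []).headD ""

-- get_dist_dict: 'if name_type not in dist_dict: dist_dict[name_type] = 0' then 'dist_dict[name_type] += 1'
def getDistDict (task : List String) : PySem.Dict String Int :=
  task.foldl (fun d name =>
    let nt := prefixA name
    let d' := if d.contains nt then d else d.insert nt 0
    d'.modify nt 0 (· + 1)) PySem.Dict.empty

-- score += score_dict[name_type] * cnt; Pre_ guarantees the key is present (KeyError inputs are excluded)
def get_task_score (task : List String) : Int :=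
  (getDistDict task).items.foldl (fun s p => s + scoreDictA.getD p.1 0 * p.2) 0

-- ===== PORT B =====
-- _weight: tiered if-chain; the final 'raise KeyError' branch is unreachable under Pre_ (its value here is irrelevant)
def weightB (t : String) : Int :=
  if t = "ifbrk" ∨ t = "ifctn" ∨ t = "ifret" then 22
  else if t = "ret" ∨ t = "ini" ∨ t = "assign" then 20
  else if t = "cond" ∨ t = "ifcond" ∨ t = "indent" then 2
  else if t = "rm" then 4
  else 1

-- sum(_weight(name.split("_")[0]) for name in task)
def get_task_score_alt (task : List String) : Int :=
  (task.map (fun name => weightB (((PySem.Str.split? name "_").getD []).headD ""))).sum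

-- ===== PRECONDITION & SPEC =====
-- Pre_ excludes exactly the inputs on which both Pythons raise KeyError: a name whose '_'-prefix is not a score_dict key.
def Pre_get_task_score (task : List String) : Prop :=
  ∀ name ∈ task, ((PySem.Str.split? name "_").getD []).headD "" ∈
    ["ifbrk", "ifctn", "ifret", "ret", "ini", "assign", "cond", "ifcond", "indent", "rm", "ctn", "brk", "method"]
instance (task : List String) : Decidable (Pre_get_task_score task) := by unfold Pre_get_task_score; infer_instance
def pvWitness_get_task_score : List String := ["ret_1", "brk", "ifbrk_x_y"]

def Spec_get_task_score (task : List String) (out : Int) : Prop := out = get_task_score_alt task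
instance (task : List String) (out : Int) : Decidable (Spec_get_task_score task out) := by unfold Spec_get_task_score; infer_instance

-- ===== CLAIM (what is proved, stated in full; the proofs are below) =====
def Claim_equal_get_task_score : Prop := ∀ (task : List String), Dom_get_task_score task → Pre_get_task_score task → Spec_get_task_score task (get_task_score task)

-- ===== LEMMAS AND PROOFS =====

-- the contains-guarded insert-0-then-increment of A is exactly Counter's modify step
lemma distStep (d : PySem.Dict String Int) (k : String) :
    (if d.contains k then d else d.insert k 0).modify k 0 (· + 1) = d.modify k 0 (· + 1) := by
  by_cases h : d.contains k
  · simp [h]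
  · simp only [h]
    simp [PySem.Dict.modify, PySem.Dict.insert_insert_self,
      PySem.Dict.getD_of_not_contains d 0 (Bool.eq_false_iff.mpr h)]

lemma getDistDict_eq_counter (task : List String) :
    getDistDict task = PySem.Dict.counter (task.map prefixA) := by
  unfold getDistDict
  rw [PySem.Dict.counter_eq_foldl, List.foldl_map]
  congr 1
  funext d name
  exact distStep d (prefixA name)

lemma sum_ite_single (w : String → Int) (x : String) (ks : List String) (hnd : ks.Nodup) :
    (ks.map (fun k => if x = k then w k else 0)).sum = if x ∈ ks then w x else 0 := by
  induction ks with
  | nil => simp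
  | cons a ks ih =>
    simp only [List.map_cons, List.sum_cons, List.nodup_cons] at *
    rcases hnd with ⟨ha, hnd⟩
    rw [ih hnd]
    by_cases hx : x = a
    · subst hx; simp [ha]
    · simp [hx]

lemma sum_weighted_count (w : String → Int) (ks ps : List String) (hnd : ks.Nodup)
    (hsub : ∀ x ∈ ps, x ∈ ks) :
    (ks.map (fun k => w k * (ps.count k : Int))).sum = (ps.map w).sum := by
  induction ps with
  | nil => simp
  | cons x ps ih =>
    have hsub' : ∀ y ∈ ps, y ∈ ks := fun y hy => hsub y (List.mem_cons_of_mem _ hy)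
    simp only [List.map_cons, List.sum_cons]
    rw [← ih hsub']
    have hstep : ∀ k, w k * (((x :: ps).count k : Nat) : Int)
        = (if x = k then w k else 0) + w k * ((ps.count k : Nat) : Int) := by
      intro k
      rw [List.count_cons]
      by_cases hk : x = k
      · simp [hk]; ring
      · simp [hk]
    simp only [hstep]
    rw [show (fun k => (if x = k then w k else 0) + w k * ((ps.count k : Nat) : Int))
        = fun k => (fun k => if x = k then w k else 0) k + (fun k => w k * ((ps.count k : Nat) : Int)) k from rfl]
    rw [List.sum_map_add (l := ks)]
    rw [sum_ite_single w x ks hnd]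
    simp [hsub x (List.mem_cons_self)]

-- on the 13 admitted prefixes A's dict lookup and B's if-chain agree
lemma weight_eq (t : String)
    (ht : t ∈ ["ifbrk", "ifctn", "ifret", "ret", "ini", "assign", "cond", "ifcond", "indent", "rm", "ctn", "brk", "method"]) :
    scoreDictA.getD t 0 = weightB t := by
  fin_cases ht <;> decide

lemma ports_agree (task : List String) (h : Pre_get_task_score task) :
    get_task_score task = get_task_score_alt task := by
  rw [get_task_score, getDistDict_eq_counter, PySem.Dict.items_counter]
  rw [PySem.List.foldl_add]
  simp only [List.map_map, Function.comp_def, zero_add]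
  rw [sum_weighted_count (fun k => scoreDictA.getD k 0) _ _ (PySem.Set.nodup_ofList _)
    (fun x hx => (PySem.Set.mem_ofList _ _).mpr hx)]
  rw [get_task_score_alt]
  simp only [List.map_map, Function.comp_def]
  apply congrArg List.sum
  apply List.map_congr_left
  intro n hn
  exact weight_eq _ (h n hn)

-- ===== VERDICT (by name: the statement is the Claim_ definition above) =====
theorem get_task_score_spec : Claim_equal_get_task_score := by
  intro task _ hpre
  exact ports_agree task hpre
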